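-- pv_equiv track=rewrite | github.com/neo4j-contrib/neomodel | test/conftest.py | version_to_dec
-- ===== SOURCE A (Python) =====
-- def version_to_dec(a_version_string):
--     """
--     Converts a version string to a number to allow for quick checks on the versions of specific components.
--
--     :param a_version_string: The version string under test (e.g. '3.4.0')
--     :type a_version_string: str
--     :return: An integer representation of the string version, e.g. '3.4.0' --> 340
--     """
--     components = a_version_string.split('.')
--     while len(components) < 3:
--         components.append('0')
--     num = 0
--     for a_component in enumerate(components):
--         num += (10 ** ((len(components) - 1) - a_component[0])) * int(a_component[1])
--     return num
-- ===== SOURCE B (Python) =====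
-- def version_to_dec(a_version_string):
--     components = a_version_string.split('.')
--     components += ['0'] * (3 - len(components))
--     num = 0
--     for c in components:
--         num = num * 10 + int(c)
--     return num
-- ===== Notes on version B (the rewrite author's own statement) =====
-- stated objective: simpler
-- what changed: Replaces the while-loop padding by a single list-extend and the positional sum 10**(n-1-i)*int(c) over enumerate by a Horner fold num = num*10 + int(c), dropping exponentiation and index arithmetic.
import Mathlib
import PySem

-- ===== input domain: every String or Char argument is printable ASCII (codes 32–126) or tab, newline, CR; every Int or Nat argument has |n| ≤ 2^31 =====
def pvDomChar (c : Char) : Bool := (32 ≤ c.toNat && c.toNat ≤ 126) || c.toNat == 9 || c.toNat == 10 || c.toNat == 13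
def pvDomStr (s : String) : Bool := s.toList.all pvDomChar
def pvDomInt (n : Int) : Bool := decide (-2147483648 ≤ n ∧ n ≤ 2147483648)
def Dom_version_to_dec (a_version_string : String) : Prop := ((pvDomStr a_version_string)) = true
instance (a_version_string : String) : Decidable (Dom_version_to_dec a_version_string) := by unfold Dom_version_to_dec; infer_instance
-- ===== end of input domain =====

-- B replaces the while-loop padding by one list-extend and the 10**(n-1-i) positional sum by a Horner fold (simpler, same cost).


-- ===== PORT A =====
-- while len(components) < 3: components.append('0')
def padComponents (xs : List String) : List String :=
  if xs.length < 3 then padComponents (xs ++ ["0"]) else xs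
termination_by 3 - xs.length
decreasing_by simp; omega

-- int(c) raising ValueError is excluded by Pre_; getD 0 is never used there.
-- the exponent (n-1)-i is always ≥ 0 in Python (i < n), so .toNat is exact on admitted inputs.
def version_to_dec (a_version_string : String) : Int :=
  let components := (PySem.Str.split? a_version_string ".").getD []
  let components := padComponents components
  let n : Int := components.length
  (PySem.List.enumerate components).foldl
    (fun num p => num + (10 : Int) ^ ((n - 1) - p.1).toNat * ((PySem.Int.ofStr? p.2).getD 0)) 0

-- ===== PORT B =====
def version_to_dec_alt (a_version_string : String) : Int :=
  let components := (PySem.Str.split? a_version_string ".").getD []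
  let components := components ++ List.replicate (3 - components.length) "0"
  components.foldl (fun num c => num * 10 + ((PySem.Int.ofStr? c).getD 0)) 0

-- ===== PRECONDITION & SPEC =====
-- excludes exactly the inputs where int() raises ValueError on a component (both A and B raise there)
def Pre_version_to_dec (a_version_string : String) : Prop :=
  ∀ c ∈ (PySem.Str.split? a_version_string ".").getD [], (PySem.Int.ofStr? c).isSome = true
instance (a_version_string : String) : Decidable (Pre_version_to_dec a_version_string) := by unfold Pre_version_to_dec; infer_instance
def pvWitness_version_to_dec : String := "3.4.0"

def Spec_version_to_dec (a_version_string : String) (out : Int) : Prop := out = version_to_dec_alt a_version_string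
instance (a_version_string : String) (out : Int) : Decidable (Spec_version_to_dec a_version_string out) := by unfold Spec_version_to_dec; infer_instance

-- ===== CLAIM (what is proved, stated in full; the proofs are below) =====
def Claim_equal_version_to_dec : Prop := ∀ (a_version_string : String), Dom_version_to_dec a_version_string → Pre_version_to_dec a_version_string → Spec_version_to_dec a_version_string (version_to_dec a_version_string)

-- ===== LEMMAS AND PROOFS =====

theorem pad_eq (xs : List String) :
    padComponents xs = xs ++ List.replicate (3 - xs.length) "0" := by
  unfold padComponents
  split
  · rename_i h
    rw [pad_eq (xs ++ ["0"])]
    have : 3 - xs.length = (3 - (xs ++ ["0"]).length) + 1 := by simp; omega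
    rw [this, List.replicate_succ]
    simp
  · rename_i h
    have : 3 - xs.length = 0 := by omega
    simp [this]
termination_by 3 - xs.length
decreasing_by simp; omega

theorem horner_init (g : String → Int) (t : List String) (a : Int) :
    t.foldl (fun num c => num * 10 + g c) a
      = a * 10 ^ t.length + t.foldl (fun num c => num * 10 + g c) 0 := by
  induction t generalizing a with
  | nil => simp
  | cons v t ih =>
    simp only [List.foldl_cons, List.length_cons]
    rw [ih (a * 10 + g v), ih (0 * 10 + g v)]
    ring

theorem main_lemma (g : String → Int) (ws : List String) (k : Int) (n : Int) (a : Int)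
    (hk : 0 ≤ k) (h : k + ws.length = n) :
    (PySem.List.enumerate ws k).foldl
        (fun num p => num + (10 : Int) ^ ((n - 1) - p.1).toNat * g p.2) a
      = ws.foldl (fun num c => num * 10 + g c) 0 + a := by
  induction ws generalizing k a with
  | nil => simp
  | cons v t ih =>
    rw [PySem.List.enumerate_cons, List.foldl_cons]
    rw [ih (k + 1) _ (by omega) (by simp only [List.length_cons] at h; push_cast at h ⊢; omega)]
    have he : ((n - 1) - k).toNat = t.length := by
      simp at h; omega
    rw [he, List.foldl_cons, horner_init g t (0 * 10 + g v)]
    ring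

-- ===== VERDICT (by name: the statement is the Claim_ definition above) =====
theorem version_to_dec_spec : Claim_equal_version_to_dec := by
  intro s _ _
  unfold Spec_version_to_dec version_to_dec version_to_dec_alt
  simp only [pad_eq]
  have h := main_lemma (fun c => (PySem.Int.ofStr? c).getD 0)
    (((PySem.Str.split? s ".").getD []) ++
      List.replicate (3 - ((PySem.Str.split? s ".").getD []).length) "0")
    0 _ 0 (by norm_num) rfl
  simpa using h
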